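-- pv_equiv track=rewrite | github.com/Miguel477713/PrecedenceRelationsOfTraces | automatav5.py | FindAdjacentRepeats
-- ===== SOURCE A (Python) =====
-- from typing import Dict, FrozenSet, List, Optional, Sequence, Set, Tuple
--
-- def FindAdjacentRepeats(events: Tuple[str, ...]) -> List[Tuple[int, int, int]]:
--     repeats = []
--     n = len(events)
--     for length in range(n // 2, 0, -1):
--         for i in range(n - 2 * length + 1):
--             j = i + length
--             if events[i: i + length] == events[j: j + length]:
--                 repeats.append((i, j, length))
--                 return [(i, j, length)]
--     return repeats
-- ===== SOURCE B (Python) =====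
-- def FindAdjacentRepeats(events):
--     # One right-to-left pass per block length: run-length of elementwise matches
--     # at distance d replaces the O(n) slice comparison, O(n^2) total.
--     n = len(events)
--     for d in range(n // 2, 0, -1):
--         run = 0
--         best = None
--         for t in range(n - d - 1, -1, -1):
--             run = run + 1 if events[t] == events[t + d] else 0
--             if t + 2 * d <= n and run >= d:
--                 best = t
--         if best is not None:
--             return [(best, best + d, d)]
--     return []
-- ===== Notes on version B (the rewrite author's own statement) =====
-- stated objective: faster
-- what changed: Replaced the O(n) slice comparison at every (length, start) candidate by a single right-to-left run-length scan per block length: run counts consecutive positions matching at distance d, and a block repeat starts wherever run >= d, so each length costs O(n) instead of O(n^2).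
import Mathlib
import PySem

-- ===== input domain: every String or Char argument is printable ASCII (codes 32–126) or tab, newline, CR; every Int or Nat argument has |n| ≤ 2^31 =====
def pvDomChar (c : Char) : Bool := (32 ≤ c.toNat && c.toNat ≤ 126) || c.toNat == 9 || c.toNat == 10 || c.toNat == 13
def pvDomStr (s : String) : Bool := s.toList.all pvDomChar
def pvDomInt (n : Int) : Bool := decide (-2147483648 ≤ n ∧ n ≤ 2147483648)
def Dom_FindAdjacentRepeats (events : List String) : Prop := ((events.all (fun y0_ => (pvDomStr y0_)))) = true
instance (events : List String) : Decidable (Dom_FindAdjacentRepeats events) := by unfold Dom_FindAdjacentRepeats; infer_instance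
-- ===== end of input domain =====

-- B replaces A's O(n) slice comparison per candidate by a right-to-left run-length
-- scan per block length (objective: faster, O(n^2) instead of O(n^3)).

-- ===== PORT A =====
def pvAInner (events : List String) (len : Int) : List Int → Option (Int × Int × Int)
  | [] => none
  | i :: rest =>
    let j := i + len
    if PySem.List.slice events (some i) (some (i + len)) =
        PySem.List.slice events (some j) (some (j + len)) then
      some (i, j, len)
    else pvAInner events len rest

def pvAOuter (events : List String) : List Int → List (Int × Int × Int)
  | [] => []
  | len :: rest =>
    match pvAInner events len (PySem.List.pyRange 0 ((events.length : Int) - 2 * len + 1) 1) with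
    | some r => [r]
    | none => pvAOuter events rest

def FindAdjacentRepeats (events : List String) : List (Int × Int × Int) :=
  pvAOuter events (PySem.List.pyRange (PySem.Int.floordiv (events.length : Int) 2) 0 (-1))

-- ===== PORT B =====
def pvBInner (events : List String) (d : Int) : List Int → Int → Option Int → Option Int
  | [], _, best => best
  | t :: rest, run, best =>
    let run' := if PySem.List.pyGetD events t "" = PySem.List.pyGetD events (t + d) "" then run + 1 else 0
    let best' := if t + 2 * d ≤ (events.length : Int) ∧ d ≤ run' then some t else best
    pvBInner events d rest run' best'

def pvBOuter (events : List String) : List Int → List (Int × Int × Int)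
  | [] => []
  | d :: rest =>
    match pvBInner events d (PySem.List.pyRange ((events.length : Int) - d - 1) (-1) (-1)) 0 none with
    | some b => [(b, b + d, d)]
    | none => pvBOuter events rest

def FindAdjacentRepeats_alt (events : List String) : List (Int × Int × Int) :=
  pvBOuter events (PySem.List.pyRange (PySem.Int.floordiv (events.length : Int) 2) 0 (-1))

-- ===== PRECONDITION & SPEC =====
def Spec_FindAdjacentRepeats (events : List String) (out : List (Int × Int × Int)) : Prop := out = FindAdjacentRepeats_alt events
instance (events : List String) (out : List (Int × Int × Int)) : Decidable (Spec_FindAdjacentRepeats events out) := by unfold Spec_FindAdjacentRepeats; infer_instance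

-- ===== CLAIM (what is proved, stated in full; the proofs are below) =====
def Claim_equal_FindAdjacentRepeats : Prop := ∀ (events : List String), Dom_FindAdjacentRepeats events → Spec_FindAdjacentRepeats events (FindAdjacentRepeats events)

-- ===== LEMMAS AND PROOFS =====

-- length of the run of matches at distance dN starting at u (stops at the last
-- position where u+dN is still a valid index)
def pvStreak (ev : List String) (dN : Nat) (u : Nat) : Nat :=
  if h : u + dN + 1 ≤ ev.length ∧ ev.getD u "" = ev.getD (u + dN) "" then
    pvStreak ev dN (u + 1) + 1
  else 0
termination_by ev.length - u
decreasing_by have := h.1; omega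

def pvCond (ev : List String) (dN : Nat) (i : Nat) : Bool :=
  decide (i + 2 * dN ≤ ev.length ∧ dN ≤ pvStreak ev dN i)

theorem pvStreak_ge_iff (ev : List String) (dN : Nat) :
    ∀ (j i : Nat), i + j + dN ≤ ev.length →
      (j ≤ pvStreak ev dN i ↔ ∀ k, k < j → ev.getD (i + k) "" = ev.getD (i + k + dN) "") := by
  intro j
  induction j with
  | zero => intro i _; simp
  | succ j ih =>
    intro i hle
    rw [pvStreak]
    by_cases hm : ev.getD i "" = ev.getD (i + dN) ""
    · rw [dif_pos ⟨by omega, hm⟩]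
      have hih := ih (i + 1) (by omega)
      constructor
      · intro hj k hk
        cases k with
        | zero => simpa using hm
        | succ k =>
          have := (hih.mp (by omega)) k (by omega)
          have e1 : i + (k + 1) = i + 1 + k := by omega
          rw [e1]; exact this
      · intro hall
        have : j ≤ pvStreak ev dN (i + 1) := by
          apply hih.mpr
          intro k hk
          have := hall (k + 1) (by omega)
          have e1 : i + (k + 1) = i + 1 + k := by omega
          rw [e1] at this; exact this
        omega
    · rw [dif_neg (by intro h; exact hm h.2)]
      constructor
      · intro h; omega
      · intro hall
        exact absurd (by simpa using hall 0 (by omega)) hm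

theorem pvSlice_eq_iff (ev : List String) (dN i : Nat) (h : i + 2 * dN ≤ ev.length) :
    ((ev.drop i).take dN = (ev.drop (i + dN)).take dN) ↔
      ∀ k, k < dN → ev.getD (i + k) "" = ev.getD (i + k + dN) "" := by
  constructor
  · intro hEq k hk
    have h1 : ((ev.drop i).take dN)[k]? = ((ev.drop (i + dN)).take dN)[k]? := by rw [hEq]
    rw [List.getElem?_take_of_lt hk, List.getElem?_take_of_lt hk,
        List.getElem?_drop, List.getElem?_drop] at h1
    have e1 : ev[i + k]? = some (ev[i + k]'(by omega)) := List.getElem?_eq_getElem (by omega)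
    have e2 : ev[i + dN + k]? = some (ev[i + dN + k]'(by omega)) := List.getElem?_eq_getElem (by omega)
    rw [List.getD_eq_getElem?_getD, List.getD_eq_getElem?_getD, e1]
    have e3 : i + k + dN = i + dN + k := by omega
    rw [e3, e2]
    rw [e1, e2] at h1
    simpa using h1
  · intro hall
    apply List.ext_getElem
    · simp; omega
    · intro k hk1 hk2
      have hk : k < dN := by simp at hk1; omega
      have := hall k hk
      rw [List.getD_eq_getElem?_getD, List.getD_eq_getElem?_getD,
          List.getElem?_eq_getElem (by omega : i + k < ev.length),
          List.getElem?_eq_getElem (by omega : i + k + dN < ev.length)] at this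
      simp only [Option.getD_some] at this
      rw [List.getElem_take, List.getElem_take, List.getElem_drop, List.getElem_drop]
      have e3 : i + dN + k = i + k + dN := by omega
      simp only [e3]
      exact this

theorem pv_find?_congr_mem {α : Type} (l : List α) (p q : α → Bool)
    (h : ∀ x ∈ l, p x = q x) : l.find? p = l.find? q := by
  induction l with
  | nil => rfl
  | cons a l ih =>
    simp only [List.find?]
    rw [h a (by simp)]
    cases hq : q a <;> simp [ih (fun x hx => h x (by simp [hx]))]

theorem pvAInner_eq_find (ev : List String) (d : Int) (l : List Nat) :
    pvAInner ev d (l.map (fun (k : Nat) => (k : Int))) =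
      (l.find? (fun (k : Nat) => decide (PySem.List.slice ev (some (k : Int)) (some ((k : Int) + d)) =
          PySem.List.slice ev (some ((k : Int) + d)) (some ((k : Int) + d + d))))).map
        (fun (k : Nat) => ((k : Int), (k : Int) + d, d)) := by
  induction l with
  | nil => rfl
  | cons a l ih =>
    simp only [List.map_cons, pvAInner, List.find?]  -- keep
    by_cases h : PySem.List.slice ev (some (a : Int)) (some ((a : Int) + d)) =
        PySem.List.slice ev (some ((a : Int) + d)) (some ((a : Int) + d + d))
    · simp [h]
    · simp only [h, decide_false]
      exact ih

theorem pvBInner_inv (ev : List String) (dN : Nat) :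
    ∀ (m : Nat), m + dN ≤ ev.length → ∀ (best : Option Int),
      pvBInner ev (dN : Int) (PySem.List.pyRange ((m : Int) - 1) (-1) (-1))
          ((pvStreak ev dN m : Int)) best =
        (((List.range m).find? (pvCond ev dN)).map (fun (i : Nat) => (i : Int))).orElse (fun _ => best) := by
  intro m
  induction m with
  | zero =>
    intro _ best
    rw [show ((0 : Nat) : Int) - 1 = -1 by norm_num,
        PySem.List.pyRange_neg_one_eq_nil (by norm_num)]
    simp [pvBInner, Option.orElse]
  | succ m ih =>
    intro hle best
    have hcons : PySem.List.pyRange (((m + 1 : Nat) : Int) - 1) (-1) (-1) =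
        (m : Int) :: PySem.List.pyRange ((m : Int) - 1) (-1) (-1) := by
      rw [show (((m + 1 : Nat) : Int) - 1) = (m : Int) by push_cast; ring]
      exact PySem.List.pyRange_neg_one_cons (by omega)
    rw [hcons]
    simp only [pvBInner]
    have hget1 : PySem.List.pyGetD ev ((m : Int)) "" = ev.getD m "" :=
      PySem.List.pyGetD_natCast ev m ""
    have hget2 : PySem.List.pyGetD ev ((m : Int) + (dN : Int)) "" = ev.getD (m + dN) "" := by
      rw [show ((m : Int) + (dN : Int)) = ((m + dN : Nat) : Int) by push_cast; ring]
      exact PySem.List.pyGetD_natCast ev (m + dN) ""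
    have hstreak : (if PySem.List.pyGetD ev ((m : Int)) "" = PySem.List.pyGetD ev ((m : Int) + (dN : Int)) "" then ((pvStreak ev dN (m + 1) : Nat) : Int) + 1 else 0) = ((pvStreak ev dN m : Nat) : Int) := by
      rw [hget1, hget2]
      conv_rhs => rw [pvStreak]
      by_cases hm : ev.getD m "" = ev.getD (m + dN) ""
      · rw [if_pos hm, dif_pos ⟨by omega, hm⟩]; push_cast; ring
      · rw [if_neg hm, dif_neg (by intro h; exact hm h.2)]; norm_num
    rw [hstreak]
    have hbest : (if (m : Int) + 2 * (dN : Int) ≤ (ev.length : Int) ∧ (dN : Int) ≤ ((pvStreak ev dN m : Nat) : Int) then some ((m : Int)) else best) =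
        (if pvCond ev dN m then some ((m : Int)) else best) := by
      unfold pvCond
      by_cases hc : m + 2 * dN ≤ ev.length ∧ dN ≤ pvStreak ev dN m
      · rw [if_pos (by omega), decide_eq_true hc, if_pos rfl]
      · rw [if_neg (by omega), decide_eq_false hc]; simp
    rw [hbest, ih (by omega)]
    rw [List.range_succ, List.find?_append]
    cases hfind : (List.range m).find? (pvCond ev dN) with
    | some v => simp [Option.orElse]
    | none =>
      simp only [List.find?]
      cases hc : pvCond ev dN m <;> simp [Option.orElse]

-- A's inner search at block length dN equals B's inner scan, mapped to triples.
theorem pvPerD (ev : List String) (dN : Nat) (h1 : 1 ≤ dN) (h2 : 2 * dN ≤ ev.length) :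
    pvAInner ev (dN : Int) (PySem.List.pyRange 0 ((ev.length : Int) - 2 * (dN : Int) + 1) 1) =
      Option.map (fun b => (b, b + (dN : Int), (dN : Int)))
        (pvBInner ev (dN : Int)
          (PySem.List.pyRange ((ev.length : Int) - (dN : Int) - 1) (-1) (-1)) 0 none) := by
  set n := ev.length with hn
  -- B side
  have hB := pvBInner_inv ev dN (n - dN) (by omega) none
  rw [show ((n - dN : Nat) : Int) - 1 = (n : Int) - (dN : Int) - 1 by push_cast [Nat.cast_sub (by omega : dN ≤ n)]; ring] at hB
  have hstreak0 : pvStreak ev dN (n - dN) = 0 := by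
    rw [pvStreak, dif_neg]; intro h; omega
  rw [hstreak0] at hB
  simp only [Nat.cast_zero] at hB
  rw [hB]
  -- A side
  have hrange : PySem.List.pyRange 0 ((ev.length : Int) - 2 * (dN : Int) + 1) 1 =
      (List.range (n - 2 * dN + 1)).map (fun (k : Nat) => (k : Int)) := by
    rw [show ((ev.length : Int) - 2 * (dN : Int) + 1) = ((n - 2 * dN + 1 : Nat) : Int) by
      push_cast [Nat.cast_sub (by omega : 2 * dN ≤ n)]; ring]
    exact PySem.List.pyRange_zero_natCast _
  rw [hrange, pvAInner_eq_find]
  -- identify the predicates on range (n - 2*dN + 1)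
  have hpred : ((List.range (n - 2 * dN + 1)).find?
      (fun (k : Nat) => decide (PySem.List.slice ev (some (k : Int)) (some ((k : Int) + (dN : Int))) =
        PySem.List.slice ev (some ((k : Int) + (dN : Int))) (some ((k : Int) + (dN : Int) + (dN : Int)))))) =
      (List.range (n - 2 * dN + 1)).find? (pvCond ev dN) := by
    apply pv_find?_congr_mem
    intro k hk
    rw [List.mem_range] at hk
    have hk2 : k + 2 * dN ≤ n := by omega
    have e1 : ((k : Int) + (dN : Int)) = ((k + dN : Nat) : Int) := by push_cast; ring
    have e2 : ((k : Int) + (dN : Int) + (dN : Int)) = ((k + dN + dN : Nat) : Int) := by push_cast; ring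
    rw [e2, e1, PySem.List.slice_natCast, PySem.List.slice_natCast,
        show k + dN - k = dN by omega, show k + dN + dN - (k + dN) = dN by omega]
    unfold pvCond
    have hiff := (pvSlice_eq_iff ev dN k hk2).trans
      ((pvStreak_ge_iff ev dN dN k (by omega)).symm)
    simp only [decide_eq_decide]
    constructor
    · intro h; exact ⟨hk2, hiff.mp h⟩
    · intro h; exact hiff.mpr h.2
  rw [hpred]
  -- extend A's shorter range to B's longer one: extra indices fail pvCond
  have hsplit : (List.range (n - dN)).find? (pvCond ev dN) =
      (List.range (n - 2 * dN + 1)).find? (pvCond ev dN) := by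
    rw [show n - dN = (n - 2 * dN + 1) + ((n - dN) - (n - 2 * dN + 1)) by omega,
        List.range_add, List.find?_append]
    have hnone : ((List.range ((n - dN) - (n - 2 * dN + 1))).map (fun (k : Nat) => n - 2 * dN + 1 + k)).find?
        (pvCond ev dN) = none := by
      rw [List.find?_eq_none]
      intro x hx
      simp only [List.mem_map, List.mem_range] at hx
      obtain ⟨k, hk, rfl⟩ := hx
      unfold pvCond
      simp only [decide_eq_true_eq, not_and]
      intro hle
      omega
    rw [hnone]
    cases (List.range (n - 2 * dN + 1)).find? (pvCond ev dN) <;> simp [Option.orElse]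
  rw [hsplit]
  cases (List.range (n - 2 * dN + 1)).find? (pvCond ev dN) <;> simp

theorem pvOuter_eq (ev : List String) :
    ∀ (ds : List Int), (∀ d ∈ ds, 1 ≤ d ∧ 2 * d ≤ (ev.length : Int)) →
      pvAOuter ev ds = pvBOuter ev ds := by
  intro ds
  induction ds with
  | nil => intro _; rfl
  | cons d rest ih =>
    intro hds
    obtain ⟨hd1, hd2⟩ := hds d (by simp)
    have hdN : d = ((d.toNat : Nat) : Int) := by omega
    simp only [pvAOuter, pvBOuter]
    have hper := pvPerD ev d.toNat (by omega) (by omega)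
    rw [← hdN] at hper
    rw [hper]
    cases pvBInner ev d (PySem.List.pyRange ((ev.length : Int) - d - 1) (-1) (-1)) 0 none with
    | none => exact ih (fun x hx => hds x (by simp [hx]))
    | some b => rfl

-- ===== VERDICT (by name: the statement is the Claim_ definition above) =====
theorem FindAdjacentRepeats_spec : Claim_equal_FindAdjacentRepeats := by
  intro events _
  unfold Spec_FindAdjacentRepeats FindAdjacentRepeats FindAdjacentRepeats_alt
  apply pvOuter_eq
  intro d hd
  set n := events.length with hn
  have hfd : PySem.Int.floordiv (n : Int) 2 = ((n / 2 : Nat) : Int) := by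
    exact_mod_cast PySem.Int.floordiv_natCast n 2
  rw [hfd, PySem.List.pyRange_neg_one] at hd
  simp only [List.mem_map, List.mem_range] at hd
  obtain ⟨k, hk, rfl⟩ := hd
  rw [show (((n / 2 : Nat) : Int) - 0).toNat = n / 2 by omega] at hk
  omega
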